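-- pv_equiv track=rewrite | github.com/joelmejo/Esercizi | Lezione06/lezione6.py | compute_surname_consonants
-- ===== SOURCE A (Python) =====
-- def compute_surname_consonants(uppercase_char_list: list) -> list:
--     uppercase_consonants: list = ['B', 'C', 'D', 'F', 'G', 'H', 'J', 'K', 'L', 'M', 'N',
--                                     'P', 'Q', 'R', 'S', 'T', 'V', 'W', 'X', 'Y', 'Z']
--
--     uppercase_vowels = ['A', 'E', 'I', 'O', 'U']
--
--     upper_consonants: list = []
--
--     for char in uppercase_char_list:
--         for consonant in uppercase_consonants:
--             if char == consonant:
--                 upper_consonants.append(char)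
--                 break
--         if len(upper_consonants) == 3:
--             break
--     if len(upper_consonants) < 3:
--         add_count: int = 0
--         for char in uppercase_char_list:
--             for vowel in uppercase_vowels:
--                 if char == vowel:
--                     upper_consonants.insert(add_count, char)
--                     add_count += 1
--                     break
--             if len(upper_consonants) == 3:
--                 break
--     while len(upper_consonants) < 3:
--         upper_consonants.append('X')
--
--     return upper_consonants
-- ===== SOURCE B (Python) =====
-- def compute_surname_consonants(uppercase_char_list: list) -> list:
--     CONS = ['B', 'C', 'D', 'F', 'G', 'H', 'J', 'K', 'L', 'M', 'N',
--             'P', 'Q', 'R', 'S', 'T', 'V', 'W', 'X', 'Y', 'Z']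
--     VOWS = ['A', 'E', 'I', 'O', 'U']
--     cons, vows = [], []
--     for c in uppercase_char_list:
--         if c in CONS:
--             cons.append(c)
--         elif c in VOWS:
--             vows.append(c)
--     cons = cons[:3]
--     result = vows[:3 - len(cons)] + cons
--     result += ['X'] * (3 - len(result))
--     return result
-- ===== Notes on version B (the rewrite author's own statement) =====
-- stated objective: simpler
-- what changed: Replaces A's two separate early-terminating scans with insert-at-front bookkeeping and a padding while-loop by a single classification pass into consonant/vowel lists followed by slice-and-concatenate construction.
import Mathlib
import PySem

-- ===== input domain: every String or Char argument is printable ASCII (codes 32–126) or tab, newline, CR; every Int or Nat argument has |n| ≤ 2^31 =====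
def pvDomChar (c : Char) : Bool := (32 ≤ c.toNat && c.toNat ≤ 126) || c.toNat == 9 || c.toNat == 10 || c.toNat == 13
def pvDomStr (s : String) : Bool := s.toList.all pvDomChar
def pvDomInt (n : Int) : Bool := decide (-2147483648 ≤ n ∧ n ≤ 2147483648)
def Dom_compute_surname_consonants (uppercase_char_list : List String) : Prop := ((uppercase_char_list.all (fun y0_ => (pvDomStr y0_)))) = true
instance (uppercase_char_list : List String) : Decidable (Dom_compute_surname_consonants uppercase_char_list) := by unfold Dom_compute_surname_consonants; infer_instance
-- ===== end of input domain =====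

-- B replaces A's two early-terminating scans (with insert-at-front bookkeeping and a
-- padding while-loop) by one classification pass plus slice-and-concatenate (simpler).

-- ===== PORT A =====
def pvConsList : List String :=
  ["B", "C", "D", "F", "G", "H", "J", "K", "L", "M", "N",
   "P", "Q", "R", "S", "T", "V", "W", "X", "Y", "Z"]

def pvVowList : List String := ["A", "E", "I", "O", "U"]

-- A's inner 'for x in lst: if char == x: … break' membership scan
def pvScan (ch : String) : List String → Bool
  | [] => false
  | c :: rest => if ch == c then true else pvScan ch rest

-- A's first loop: append consonants, break at length 3
def pvConsLoop : List String → List String → List String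
  | [], acc => acc
  | ch :: rest, acc =>
    let acc' := if pvScan ch pvConsList then acc ++ [ch] else acc
    if acc'.length == 3 then acc' else pvConsLoop rest acc'

-- A's second loop: insert vowels at position add_count, break at length 3
def pvVowLoop : List String → List String → Nat → List String
  | [], acc, _ => acc
  | ch :: rest, acc, k =>
    let s := if pvScan ch pvVowList then (PySem.List.insert acc (k : Int) ch, k + 1)
             else (acc, k)
    if s.1.length == 3 then s.1 else pvVowLoop rest s.1 s.2

-- A's padding while-loop
def pvPad (acc : List String) : List String :=
  if acc.length < 3 then pvPad (acc ++ ["X"]) else acc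
termination_by 3 - acc.length
decreasing_by simp; omega

def compute_surname_consonants (uppercase_char_list : List String) : List String :=
  let uc := pvConsLoop uppercase_char_list []
  let uc2 := if uc.length < 3 then pvVowLoop uppercase_char_list uc 0 else uc
  pvPad uc2

-- ===== PORT B =====
-- one pass classifying each element into (cons, vows); 'c in CONS' = List.contains
def compute_surname_consonants_alt (uppercase_char_list : List String) : List String :=
  let p := uppercase_char_list.foldl
    (fun (acc : List String × List String) c =>
      if pvConsList.contains c then (acc.1 ++ [c], acc.2)
      else if pvVowList.contains c then (acc.1, acc.2 ++ [c])
      else acc) ([], [])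
  let cons := p.1.take 3                                -- cons[:3]
  let result := p.2.take (3 - cons.length) ++ cons      -- vows[:3-len(cons)] + cons (3-len ≥ 0)
  result ++ List.replicate (3 - result.length) "X"      -- + ['X']*(3-len(result))

-- ===== PRECONDITION & SPEC =====
def Spec_compute_surname_consonants (uppercase_char_list : List String) (out : List String) : Prop := out = compute_surname_consonants_alt uppercase_char_list
instance (uppercase_char_list : List String) (out : List String) : Decidable (Spec_compute_surname_consonants uppercase_char_list out) := by unfold Spec_compute_surname_consonants; infer_instance

-- ===== CLAIM (what is proved, stated in full; the proofs are below) =====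
def Claim_equal_compute_surname_consonants : Prop := ∀ (uppercase_char_list : List String), Dom_compute_surname_consonants uppercase_char_list → Spec_compute_surname_consonants uppercase_char_list (compute_surname_consonants uppercase_char_list)

-- ===== LEMMAS AND PROOFS =====

theorem pvScan_eq_contains (cs : List String) (ch : String) : pvScan ch cs = cs.contains ch := by
  induction cs with
  | nil => rfl
  | cons c rest ih => simp [pvScan, ih]

theorem pvDisj : ∀ c ∈ pvConsList, pvVowList.contains c = false := by decide

theorem pvConsLoop_eq (l : List String) : ∀ acc : List String, acc.length < 3 →
    pvConsLoop l acc = (acc ++ l.filter (fun c => pvConsList.contains c)).take 3 := by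
  induction l with
  | nil =>
    intro acc h
    simp [pvConsLoop, List.take_of_length_le (by omega : acc.length ≤ 3)]
  | cons ch rest ih =>
    intro acc h
    simp only [pvConsLoop, pvScan_eq_contains]
    by_cases hc : pvConsList.contains ch = true
    · rw [if_pos hc, List.filter_cons_of_pos (by simpa using hc)]
      by_cases h3 : (acc ++ [ch]).length = 3
      · rw [if_pos (by simpa using h3),
            show acc ++ ch :: rest.filter (fun c => pvConsList.contains c)
              = (acc ++ [ch]) ++ rest.filter (fun c => pvConsList.contains c) by simp,
            List.take_append_of_le_length (by omega),
            List.take_of_length_le (by omega)]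
      · have hlt : (acc ++ [ch]).length < 3 := by simp at h3 ⊢; omega
        rw [if_neg (by simpa using h3), ih _ hlt]
        simp
    · rw [if_neg hc, List.filter_cons_of_neg (by simpa using hc),
          if_neg (by simpa using (by omega : acc.length ≠ 3)), ih _ h]

theorem pvVowLoop_eq (l : List String) : ∀ v c : List String, (v ++ c).length < 3 →
    pvVowLoop l (v ++ c) v.length
      = (v ++ l.filter (fun ch => pvVowList.contains ch)).take (3 - c.length) ++ c := by
  induction l with
  | nil =>
    intro v c h
    have hle : v.length ≤ 3 - c.length := by simp at h; omega
    simp [pvVowLoop, List.take_of_length_le hle]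
  | cons ch rest ih =>
    intro v c h
    simp only [pvVowLoop, pvScan_eq_contains]
    by_cases hv : pvVowList.contains ch = true
    · have hins : PySem.List.insert (v ++ c) (v.length : Int) ch = (v ++ [ch]) ++ c := by
        rw [PySem.List.insert_natCast _ _ _ (by simp)]
        simp
      rw [if_pos hv, List.filter_cons_of_pos (by simpa using hv)]
      simp only [hins]
      by_cases h3 : ((v ++ [ch]) ++ c).length = 3
      · have h3' : v.length + c.length + 1 = 3 := by simp at h3; omega
        rw [if_pos (by simpa using h3),
            show v ++ ch :: rest.filter (fun x => pvVowList.contains x)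
              = (v ++ [ch]) ++ rest.filter (fun x => pvVowList.contains x) by simp,
            show 3 - c.length = (v ++ [ch]).length by simp; omega,
            List.take_append_of_le_length (le_refl _), List.take_length]
      · have hlt : ((v ++ [ch]) ++ c).length < 3 := by
          have hle3 : ((v ++ [ch]) ++ c).length ≤ 3 := by simp at h ⊢; omega
          omega
        rw [if_neg (by simpa using h3),
            show v.length + 1 = (v ++ [ch]).length by simp, ih _ _ hlt]
        simp
    · rw [if_neg hv, List.filter_cons_of_neg (by simpa using hv),
          if_neg (by simpa using (by omega : (v ++ c).length ≠ 3)), ih _ _ h]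

theorem pvPad_eq (acc : List String) : pvPad acc = acc ++ List.replicate (3 - acc.length) "X" := by
  by_cases h : acc.length < 3
  · rw [pvPad, if_pos h, pvPad_eq (acc ++ ["X"])]
    rw [show 3 - acc.length = (3 - (acc ++ ["X"]).length) + 1 by simp; omega,
        List.replicate_succ]
    simp
  · rw [pvPad, if_neg h]
    simp [show 3 - acc.length = 0 by omega]
termination_by 3 - acc.length
decreasing_by simp; omega

theorem pvFoldl_eq (l : List String) : ∀ a b : List String,
    l.foldl (fun (acc : List String × List String) c =>
      if pvConsList.contains c then (acc.1 ++ [c], acc.2)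
      else if pvVowList.contains c then (acc.1, acc.2 ++ [c])
      else acc) (a, b)
    = (a ++ l.filter (fun c => pvConsList.contains c),
       b ++ l.filter (fun c => pvVowList.contains c)) := by
  induction l with
  | nil => simp
  | cons c rest ih =>
    intro a b
    rw [List.foldl_cons]
    by_cases hc : pvConsList.contains c = true
    · have hv : pvVowList.contains c = false := pvDisj c (by simpa using hc)
      rw [if_pos hc, ih, List.filter_cons_of_pos (by simpa using hc),
          List.filter_cons_of_neg (by simpa using hv)]
      simp
    · by_cases hv : pvVowList.contains c = true
      · rw [if_neg hc, if_pos hv, ih, List.filter_cons_of_neg (by simpa using hc),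
            List.filter_cons_of_pos (by simpa using hv)]
        simp
      · rw [if_neg hc, if_neg hv, ih, List.filter_cons_of_neg (by simpa using hc),
            List.filter_cons_of_neg (by simpa using hv)]

-- ===== VERDICT (by name: the statement is the Claim_ definition above) =====
theorem compute_surname_consonants_spec : Claim_equal_compute_surname_consonants := by
  intro l _
  unfold Spec_compute_surname_consonants compute_surname_consonants compute_surname_consonants_alt
  rw [pvFoldl_eq]
  simp only [List.nil_append]
  set F := l.filter (fun c => pvConsList.contains c) with hF
  set V := l.filter (fun c => pvVowList.contains c) with hV
  rw [pvConsLoop_eq l [] (by simp)]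
  simp only [List.nil_append]
  by_cases h : (F.take 3).length < 3
  · rw [if_pos h]
    have h0 : (([] : List String) ++ F.take 3).length < 3 := by simpa using h
    have hvl := pvVowLoop_eq l [] (F.take 3) h0
    simp only [List.nil_append, List.length_nil] at hvl
    rw [hvl, pvPad_eq]
  · rw [if_neg h, pvPad_eq]
    have h3 : (F.take 3).length = 3 := by
      have := List.length_take_le 3 F; omega
    simp only [h3, Nat.sub_self, List.take_zero, List.nil_append, List.replicate_zero,
      List.append_nil]
    rw [← hF, h3]
    simp
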